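-- pv_equiv track=rewrite | github.com/nishan7/DSA | Data/Greedy Algorithms/Coin Piles/Coin Piles.py | solve
-- ===== SOURCE A (Python) =====
-- def solve(n, k, coins):
--     coins.sort(reverse=True)
--     smallest = coins[-1]
--
--     count = 0
--     for coin in coins:
--         extra = coin - k - smallest
--         if extra > 0:
--             count += extra
--         else:
--             return count
--
--     return count
-- ===== SOURCE B (Python) =====
-- def solve(n, k, coins):
--     # One pass, no sort: min once, then sum the positive excesses.
--     # (Does not mutate coins, unlike A's in-place sort; return value identical.)
--     smallest = min(coins)
--     total = 0
--     for coin in coins: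
--         total += max(coin - k - smallest, 0)
--     return total
-- ===== Notes on version B (the rewrite author's own statement) =====
-- stated objective: alternative
-- what changed: Replaced sort-descending-then-early-return with a single unsorted pass: find min once and sum max(0, coin-k-min) over all coins; no sort, no in-place mutation of coins (O(n) passes vs O(n log n) sort, though not measured >=1.5x faster).
-- outside the precondition, e.g. on solve(0, 0, []): A raises IndexError, B raises ValueError
import Mathlib
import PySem

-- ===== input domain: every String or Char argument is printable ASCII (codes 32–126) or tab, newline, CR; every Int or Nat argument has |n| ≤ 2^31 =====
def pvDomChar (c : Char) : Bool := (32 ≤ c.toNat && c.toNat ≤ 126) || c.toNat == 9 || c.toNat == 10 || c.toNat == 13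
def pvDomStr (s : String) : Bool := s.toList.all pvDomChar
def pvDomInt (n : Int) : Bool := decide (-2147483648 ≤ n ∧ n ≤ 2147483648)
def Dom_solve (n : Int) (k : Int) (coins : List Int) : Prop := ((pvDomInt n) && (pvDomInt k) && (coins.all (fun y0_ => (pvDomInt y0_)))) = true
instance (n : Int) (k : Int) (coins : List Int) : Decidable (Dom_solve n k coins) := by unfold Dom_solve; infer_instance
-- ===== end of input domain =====

-- B replaces A's sort-descending-then-early-return with one unsorted pass: min once,
-- then sum the positive excesses. The equivalence proved is about the RETURN value
-- only — A sorts `coins` in place, B does not mutate it.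

-- ===== PORT A =====
-- the 'for coin in coins: … else: return count' loop, carrying `count`
def solveLoopA (k m : Int) : List Int → Int → Int
  | [], count => count
  | c :: rest, count =>
      if c - k - m > 0 then solveLoopA k m rest (count + (c - k - m)) else count

def solve (n : Int) (k : Int) (coins : List Int) : Int :=
  -- coins.sort(reverse=True); smallest = coins[-1] (IndexError on []); then the loop
  match PySem.List.pyGet? (PySem.List.sorted coins (fun x => x) true) (-1) with
  | none => 0                                           -- unreachable under Pre_solve
  | some smallest => solveLoopA k smallest (PySem.List.sorted coins (fun x => x) true) 0

-- ===== PORT B =====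
def solve_alt (n : Int) (k : Int) (coins : List Int) : Int :=
  match PySem.List.min? coins (fun x => x) with         -- min(coins); ValueError on []
  | none => 0                                           -- unreachable under Pre_solve
  | some smallest =>
      coins.foldl (fun total coin => total + max (coin - k - smallest) 0) 0

-- ===== PRECONDITION & SPEC =====
-- Pre_ excludes only the empty list, on which A raises IndexError (coins[-1]).
def Pre_solve (n : Int) (k : Int) (coins : List Int) : Prop := coins ≠ []
instance (n : Int) (k : Int) (coins : List Int) : Decidable (Pre_solve n k coins) := by unfold Pre_solve; infer_instance
def pvWitness_solve : Int × Int × List Int := (3, 1, [5, 3, 9])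

def Spec_solve (n : Int) (k : Int) (coins : List Int) (out : Int) : Prop := out = solve_alt n k coins
instance (n : Int) (k : Int) (coins : List Int) (out : Int) : Decidable (Spec_solve n k coins out) := by unfold Spec_solve; infer_instance

-- ===== CLAIM (what is proved, stated in full; the proofs are below) =====
def Claim_equal_solve : Prop := ∀ (n : Int) (k : Int) (coins : List Int), Dom_solve n k coins → Pre_solve n k coins → Spec_solve n k coins (solve n k coins)

-- ===== LEMMAS AND PROOFS =====

-- On a descending list, A's early-return loop equals the full sum of positive excesses.
theorem solveLoopA_eq_sum (k m : Int) (l : List Int)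
    (h : l.Pairwise (fun a b => b ≤ a)) (count : Int) :
    solveLoopA k m l count = count + (l.map (fun c => max (c - k - m) 0)).sum := by
  induction l generalizing count with
  | nil => simp [solveLoopA]
  | cons c rest ih =>
    rcases List.pairwise_cons.mp h with ⟨hc, hrest⟩
    by_cases hpos : c - k - m > 0
    · simp only [solveLoopA, if_pos hpos, ih hrest, List.map_cons, List.sum_cons]
      have : max (c - k - m) 0 = c - k - m := max_eq_left (le_of_lt hpos)
      rw [this]; ring
    · simp only [solveLoopA, if_neg hpos, List.map_cons, List.sum_cons]
      have h1 : max (c - k - m) 0 = 0 := max_eq_right (by omega)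
      have h2 : (rest.map (fun c => max (c - k - m) 0)).sum = 0 := by
        apply List.sum_eq_zero
        intro x hx
        rcases List.mem_map.mp hx with ⟨b, hb, rfl⟩
        exact max_eq_right (by have := hc b hb; omega)
      rw [h1, h2]; ring

theorem getLast_sorted_eq_min (coins : List Int) (h : coins ≠ []) (m : Int)
    (hm : PySem.List.min? coins (fun x => x) = some m) :
    PySem.List.pyGet? (PySem.List.sorted coins (fun x => x) true) (-1) = some m := by
  set s := PySem.List.sorted coins (fun x => x) true with hs
  have hperm : s.Perm coins := PySem.List.sorted_perm ..
  have hpw : s.Pairwise (fun a b => b ≤ a) := PySem.List.sorted_pairwise_rev ..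
  have hrev : s.reverse.Pairwise (fun a b => a ≤ b) := by simpa using hpw.reverse
  rw [PySem.List.pyGet?_neg_one, ← List.head?_reverse]
  cases hr : s.reverse with
  | nil =>
    have hs0 : s = [] := by simpa using congrArg List.reverse hr
    have hlen : coins.length = 0 := by rw [← hperm.length_eq, hs0]; rfl
    exact absurd (List.length_eq_zero_iff.mp hlen) h
  | cons x t =>
    have hxs : x ∈ s := by rw [← List.mem_reverse, hr]; exact List.mem_cons_self ..
    have hmr : m ∈ x :: t := by
      rw [← hr, List.mem_reverse]; exact hperm.mem_iff.mpr (PySem.List.min?_mem hm)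
    have h1 : m ≤ x := PySem.List.min?_isMin hm x (hperm.mem_iff.mp hxs)
    have h2 : x ≤ m := by
      rcases List.mem_cons.mp hmr with rfl | hmt
      · exact le_refl _
      · exact (List.pairwise_cons.mp (hr ▸ hrev)).1 m hmt
    simp [le_antisymm h2 h1]

-- ===== VERDICT (by name: the statement is the Claim_ definition above) =====
theorem solve_spec : Claim_equal_solve := by
  intro n k coins _ hpre
  unfold Spec_solve solve solve_alt
  have hne : coins ≠ [] := hpre
  cases hm : PySem.List.min? coins (fun x => x) with
  | none => exact absurd ((PySem.List.min?_eq_none_iff _ _).mp hm) hne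
  | some m =>
    rw [getLast_sorted_eq_min coins hne m hm]
    show solveLoopA k m (PySem.List.sorted coins (fun x => x) true) 0
        = List.foldl (fun total coin => total + max (coin - k - m) 0) 0 coins
    rw [solveLoopA_eq_sum k m _ (PySem.List.sorted_pairwise_rev ..) 0,
        PySem.List.foldl_add]
    have := ((PySem.List.sorted_perm coins (fun x => x) true).map
      (fun c => max (c - k - m) 0)).sum_eq
    omega
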